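-- pv_equiv track=rewrite | github.com/dkumarvaishnav/creative-cloner | tools/generate_images.py | truncate_prompt
-- ===== SOURCE A (Python) =====
-- def truncate_prompt(prompt, max_length=1000):
--     """
--     Truncate prompt to fit within character limit while preserving key information
--     """
--     if len(prompt) <= max_length:
--         return prompt
--
--     # Extract key elements (first sentence or two)
--     sentences = prompt.split('.')
--     truncated = ""
--     for sentence in sentences:
--         if len(truncated) + len(sentence) + 1 <= max_length - 50:  # Leave room for ending
--             truncated += sentence + "."
--         else:
--             break
--
--     # If still empty or too short, just truncate at max_length
--     if not truncated or len(truncated) < 50: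
--         truncated = prompt[:max_length-3] + "..."
--
--     return truncated.strip()
-- ===== SOURCE B (Python) =====
-- def truncate_prompt(prompt, max_length=1000):
--     """
--     Truncate prompt to fit within character limit while preserving key information
--     """
--     if len(prompt) <= max_length:
--         return prompt
--
--     # Scan the raw string once: remember the end (i+1) of the last period that
--     # still fits the budget. The greedy sentence loop of A keeps exactly the
--     # prefix of the prompt ending at that period, so no split is needed.
--     budget = max_length - 50
--     cut = 0
--     i = 0
--     for ch in prompt:
--         if ch == '.' and i + 1 <= budget:
--             cut = i + 1
--         i += 1
--     truncated = prompt[:cut]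
--
--     if not truncated or len(truncated) < 50:
--         truncated = prompt[:max_length - 3] + '...'
--
--     return truncated.strip()
-- ===== Notes on version B (the rewrite author's own statement) =====
-- stated objective: alternative
-- what changed: B never splits the prompt into sentences: a single scan of the raw string records the end of the last period that still fits the budget, and one slice of the prompt yields exactly the prefix A's greedy sentence-appending loop builds; guard and fallback unchanged.
import Mathlib
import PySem

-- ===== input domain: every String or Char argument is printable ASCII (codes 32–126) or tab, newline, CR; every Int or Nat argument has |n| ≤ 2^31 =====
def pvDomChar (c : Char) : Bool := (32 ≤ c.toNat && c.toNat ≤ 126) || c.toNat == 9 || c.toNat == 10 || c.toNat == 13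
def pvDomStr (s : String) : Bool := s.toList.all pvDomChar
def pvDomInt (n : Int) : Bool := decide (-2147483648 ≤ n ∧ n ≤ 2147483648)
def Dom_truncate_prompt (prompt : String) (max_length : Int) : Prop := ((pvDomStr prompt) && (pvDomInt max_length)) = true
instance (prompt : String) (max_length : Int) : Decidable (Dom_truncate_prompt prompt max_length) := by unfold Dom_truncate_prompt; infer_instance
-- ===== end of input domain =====

-- B drops A's split-and-append sentence loop entirely: one scan of the raw string
-- records the end of the last period that fits the budget, and a single slice of the
-- prompt gives the same greedy prefix (objective: alternative).

-- ===== PORT A =====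
-- the greedy for-loop with break: append sentence + "." while it still fits
def pvLoopA (ml : Int) (acc : List Char) : List (List Char) → List Char
  | [] => acc
  | s :: rest =>
      if (acc.length : Int) + s.length + 1 ≤ ml - 50 then
        pvLoopA ml (acc ++ s ++ ['.']) rest
      else acc

def truncate_prompt (prompt : String) (max_length : Int) : String :=
  if (prompt.toList.length : Int) ≤ max_length then prompt
  else
    let cs := prompt.toList
    let sentences := PySem.Chars.splitOn cs ['.']
    let truncated := pvLoopA max_length [] sentences
    let truncated :=
      if truncated = [] ∨ (truncated.length : Int) < 50 then
        PySem.List.slice cs none (some (max_length - 3)) ++ ['.', '.', '.']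
      else truncated
    String.ofList (PySem.Chars.strip truncated)

-- ===== PORT B =====
-- the single scan: cut ends up at i+1 for the last '.' at index i with i+1 <= budget
def pvScanB (budget : Int) : List Char → Nat → Nat → Nat
  | [], _, cut => cut
  | ch :: rest, i, cut =>
      pvScanB budget rest (i + 1) (if ch = '.' ∧ (i : Int) + 1 ≤ budget then i + 1 else cut)

def truncate_prompt_alt (prompt : String) (max_length : Int) : String :=
  if (prompt.toList.length : Int) ≤ max_length then prompt
  else
    let cs := prompt.toList
    let budget := max_length - 50
    let cut := pvScanB budget cs 0 0
    let truncated := PySem.List.slice cs none (some (cut : Int))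
    let truncated :=
      if truncated = [] ∨ (truncated.length : Int) < 50 then
        PySem.List.slice cs none (some (max_length - 3)) ++ ['.', '.', '.']
      else truncated
    String.ofList (PySem.Chars.strip truncated)

-- ===== PRECONDITION & SPEC =====
def Spec_truncate_prompt (prompt : String) (max_length : Int) (out : String) : Prop := out = truncate_prompt_alt prompt max_length
instance (prompt : String) (max_length : Int) (out : String) : Decidable (Spec_truncate_prompt prompt max_length out) := by unfold Spec_truncate_prompt; infer_instance

-- ===== CLAIM (what is proved, stated in full; the proofs are below) =====
def Claim_equal_truncate_prompt : Prop := ∀ (prompt : String) (max_length : Int), Dom_truncate_prompt prompt max_length → Spec_truncate_prompt prompt max_length (truncate_prompt prompt max_length)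

-- ===== LEMMAS AND PROOFS =====

-- reference splitter for sep = ".": splitOn unrolled to a plain structural recursion
def pvSplit (pre : List Char) : List Char → List (List Char)
  | [] => [pre]
  | c :: rest => if c = '.' then pre :: pvSplit [] rest else pvSplit (pre ++ [c]) rest

lemma pvSplit_go_spec : ∀ (fuel : Nat) (l cur : List Char) (accs : List (List Char)),
    l.length < fuel →
    PySem.Chars.splitOn.go ['.'] fuel l cur accs = accs.reverse ++ pvSplit cur.reverse l := by
  intro fuel
  induction fuel with
  | zero => intro l cur accs h; exact absurd h (Nat.not_lt_zero _)
  | succ f ih =>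
      intro l cur accs h
      cases l with
      | nil =>
          show (cur.reverse :: accs).reverse = accs.reverse ++ pvSplit cur.reverse []
          simp [pvSplit]
      | cons c rest =>
          rw [show PySem.Chars.splitOn.go ['.'] (f + 1) (c :: rest) cur accs =
                (if List.isPrefixOf ['.'] (c :: rest) = true then
                  PySem.Chars.splitOn.go ['.'] f (List.drop (List.length ['.']) (c :: rest)) []
                    (cur.reverse :: accs)
                else PySem.Chars.splitOn.go ['.'] f rest (c :: cur) accs) from rfl]
          have hlen : rest.length < f := by simpa using h
          by_cases hc : c = '.'
          · have hp : List.isPrefixOf ['.'] (c :: rest) = true := by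
              simp [List.isPrefixOf, hc]
            rw [if_pos hp]
            simp only [List.length_cons, List.length_nil, Nat.zero_add, List.drop_succ_cons,
              List.drop_zero]
            rw [ih rest [] (cur.reverse :: accs) hlen]
            simp [pvSplit, hc]
          · have hp : ¬ (List.isPrefixOf ['.'] (c :: rest) = true) := by
              simp [List.isPrefixOf]
              intro hh
              exact absurd hh.symm hc
            rw [if_neg hp, ih rest (c :: cur) accs hlen]
            simp [pvSplit, hc]

lemma splitOn_eq_pvSplit (cs : List Char) : PySem.Chars.splitOn cs ['.'] = pvSplit [] cs := by
  show PySem.Chars.splitOn.go ['.'] (cs.length + 1) cs [] [] = pvSplit [] cs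
  rw [pvSplit_go_spec (cs.length + 1) cs [] [] (Nat.lt_succ_self _)]
  simp

lemma pvSplit_nodot {l : List Char} (h : '.' ∉ l) : ∀ pre, pvSplit pre l = [pre ++ l] := by
  induction l with
  | nil => intro pre; simp [pvSplit]
  | cons c rest ih =>
      intro pre
      have hc : c ≠ '.' := by intro hh; exact h (hh ▸ List.mem_cons_self)
      have hr : '.' ∉ rest := fun hh => h (List.mem_cons_of_mem _ hh)
      simp [pvSplit, hc, ih hr]

lemma pvSplit_dot {mid : List Char} (h : '.' ∉ mid) (rest : List Char) :
    ∀ pre, pvSplit pre (mid ++ '.' :: rest) = (pre ++ mid) :: pvSplit [] rest := by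
  induction mid with
  | nil => intro pre; simp [pvSplit]
  | cons c m ih =>
      intro pre
      have hc : c ≠ '.' := by intro hh; exact h (hh ▸ List.mem_cons_self)
      have hm : '.' ∉ m := fun hh => h (List.mem_cons_of_mem _ hh)
      simp only [List.cons_append, pvSplit, if_neg hc, ih hm, List.append_assoc]
      simp

lemma pvFirstDot : ∀ (cs : List Char), '.' ∈ cs → ∃ pre rest, cs = pre ++ '.' :: rest ∧ '.' ∉ pre := by
  intro cs
  induction cs with
  | nil => intro h; simp at h
  | cons c rest ih =>
      intro h
      by_cases hc : c = '.'
      · exact ⟨[], rest, by simp [hc], by simp⟩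
      · have hr : '.' ∈ rest := by
          rcases List.mem_cons.mp h with h1 | h2
          · exact absurd h1.symm hc
          · exact h2
        obtain ⟨p, r, heq, hnp⟩ := ih hr
        refine ⟨c :: p, r, by simp [heq], ?_⟩
        simp only [List.mem_cons, not_or]
        exact ⟨fun hh => hc hh.symm, hnp⟩

-- greedy break index, parameterised by the remaining budget
def pvG (b : Int) : List (List Char) → Nat
  | [] => 0
  | s :: rest => if (s.length : Int) + 1 ≤ b then pvG (b - (s.length + 1)) rest + 1 else 0

lemma pvLoopA_eq (ml : Int) (t : List (List Char)) : ∀ acc,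
    pvLoopA ml acc t = acc ++ ((t.take (pvG (ml - 50 - acc.length) t)).map (· ++ ['.'])).flatten := by
  induction t with
  | nil => intro acc; simp [pvLoopA, pvG]
  | cons s rest ih =>
      intro acc
      rw [pvLoopA, pvG]
      by_cases h : (acc.length : Int) + s.length + 1 ≤ ml - 50
      · have hcond : (s.length : Int) + 1 ≤ ml - 50 - acc.length := by omega
        rw [if_pos h, if_pos hcond, ih]
        have harg : ml - 50 - ((acc ++ s ++ ['.']).length : Int) = ml - 50 - acc.length - (s.length + 1) := by
          simp; ring
        rw [List.take_succ_cons, List.map_cons, List.flatten_cons, harg]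
        simp [List.append_assoc]
      · have hcond : ¬ ((s.length : Int) + 1 ≤ ml - 50 - acc.length) := by omega
        rw [if_neg h, if_neg hcond]
        simp

lemma pvScanB_nodot {xs : List Char} (h : '.' ∉ xs) :
    ∀ (b : Int) (n cut : Nat), pvScanB b xs n cut = cut := by
  induction xs with
  | nil => intro b n cut; simp [pvScanB]
  | cons c rest ih =>
      intro b n cut
      have hc : c ≠ '.' := by intro hh; exact h (hh ▸ List.mem_cons_self)
      have hr : '.' ∉ rest := fun hh => h (List.mem_cons_of_mem _ hh)
      simp [pvScanB, hc, ih hr]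

lemma pvScanB_nonpos {b : Int} (hb : b ≤ 0) :
    ∀ (xs : List Char) (n cut : Nat), pvScanB b xs n cut = cut := by
  intro xs
  induction xs with
  | nil => intro n cut; simp [pvScanB]
  | cons c rest ih =>
      intro n cut
      have : ¬ ((n : Int) + 1 ≤ b) := by omega
      simp [pvScanB, this, ih]

lemma pvScanB_append : ∀ (xs ys : List Char) (b : Int) (n cut : Nat),
    pvScanB b (xs ++ ys) n cut = pvScanB b ys (n + xs.length) (pvScanB b xs n cut) := by
  intro xs
  induction xs with
  | nil => intro ys b n cut; simp [pvScanB]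
  | cons c rest ih =>
      intro ys b n cut
      simp only [List.cons_append, pvScanB, ih, List.length_cons]
      ring_nf

lemma pvScanB_shift : ∀ (xs : List Char) (b : Int) (n cut : Nat),
    pvScanB b xs n cut =
      (if pvScanB (b - n) xs 0 0 = 0 then cut else n + pvScanB (b - n) xs 0 0) := by
  intro xs
  induction xs with
  | nil => intro b n cut; simp [pvScanB]
  | cons c rest ih =>
      intro b n cut
      have hcast : ((n + 1 : Nat) : Int) = (n : Int) + 1 := by push_cast; ring
      have e1 : ∀ x : Nat, pvScanB b rest (n + 1) x =
          if pvScanB (b - ((n : Int) + 1)) rest 0 0 = 0 then x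
          else (n + 1) + pvScanB (b - ((n : Int) + 1)) rest 0 0 := by
        intro x; rw [ih b (n + 1) x, hcast]
      have e2 : ∀ x : Nat, pvScanB (b - n) rest 1 x =
          if pvScanB (b - ((n : Int) + 1)) rest 0 0 = 0 then x
          else 1 + pvScanB (b - ((n : Int) + 1)) rest 0 0 := by
        intro x
        rw [ih (b - n) 1 x]
        have harg : b - (n : Int) - ((1 : Nat) : Int) = b - ((n : Int) + 1) := by push_cast; ring
        rw [harg]
      rw [show pvScanB b (c :: rest) n cut =
            pvScanB b rest (n + 1) (if c = '.' ∧ (n : Int) + 1 ≤ b then n + 1 else cut) from rfl,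
          show pvScanB (b - n) (c :: rest) 0 0 =
            pvScanB (b - n) rest (0 + 1) (if c = '.' ∧ ((0 : Nat) : Int) + 1 ≤ b - n then 0 + 1 else 0) from rfl]
      rw [e1, e2]
      set r := pvScanB (b - ((n : Int) + 1)) rest 0 0 with hrdef
      by_cases hcq : c = '.' <;> by_cases hble : (n : Int) + 1 ≤ b <;>
        by_cases hr0 : r = 0 <;>
        simp [hcq, hble, hr0] <;> (try split_ifs) <;> omega

-- the bridge: A's greedy join over the sentence list IS B's single-scan prefix
lemma pvBridge : ∀ (n : Nat) (cs : List Char), cs.length ≤ n → ∀ b : Int, b ≤ (cs.length : Int) →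
    (((pvSplit [] cs).take (pvG b (pvSplit [] cs))).map (· ++ ['.'])).flatten
      = cs.take (pvScanB b cs 0 0) := by
  intro n
  induction n with
  | zero =>
      intro cs hlen b hb
      have hnil : cs = [] := List.length_eq_zero_iff.mp (Nat.le_zero.mp hlen)
      subst hnil
      simp only [List.length_nil, Int.natCast_zero] at hb
      simp [pvSplit, pvG, pvScanB, show ¬ ((1 : Int) ≤ b) from by omega]
  | succ n ih =>
      intro cs hlen b hb
      by_cases hdot : '.' ∈ cs
      · obtain ⟨pre, rest, heq, hnp⟩ := pvFirstDot cs hdot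
        subst heq
        rw [pvSplit_dot hnp rest []]
        simp only [List.nil_append]
        have hlrest : rest.length ≤ n := by
          simp [List.length_append] at hlen; omega
        have hstep : ∀ x : Nat, pvScanB b ('.' :: rest) pre.length x =
            pvScanB b rest (pre.length + 1)
              (if ('.' : Char) = '.' ∧ ((pre.length : Nat) : Int) + 1 ≤ b then pre.length + 1 else x) := by
          intro x; rfl
        by_cases hc : (pre.length : Int) + 1 ≤ b
        · -- this sentence is taken by the greedy loop
          have hscan : pvScanB b (pre ++ '.' :: rest) 0 0 =
              pvScanB b rest (pre.length + 1) (pre.length + 1) := by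
            rw [pvScanB_append, pvScanB_nodot hnp, Nat.zero_add, hstep, if_pos ⟨rfl, hc⟩]
          have hb' : b - ((pre.length : Int) + 1) ≤ (rest.length : Int) := by
            simp only [List.length_append, List.length_cons] at hb; push_cast at hb ⊢; omega
          have hIH := ih rest hlrest (b - ((pre.length : Int) + 1)) hb'
          rw [pvG, if_pos hc, List.take_succ_cons, List.map_cons, List.flatten_cons, hIH]
          rw [hscan, pvScanB_shift rest b (pre.length + 1)]
          have hcast : ((pre.length + 1 : Nat) : Int) = (pre.length : Int) + 1 := by push_cast; ring
          rw [hcast]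
          set r := pvScanB (b - ((pre.length : Int) + 1)) rest 0 0 with hr
          have hsplit : pre ++ '.' :: rest = (pre ++ ['.']) ++ rest := by simp
          by_cases hr0 : r = 0
          · rw [if_pos hr0, hr0, hsplit]
            rw [show pre.length + 1 = (pre ++ ['.']).length by simp]
            rw [List.take_left, List.take_zero, List.append_nil]
          · rw [if_neg hr0, hsplit, List.take_append,
                List.take_of_length_le (l := pre ++ ['.']) (i := pre.length + 1 + r)
                  (by simp only [List.length_append, List.length_cons, List.length_nil]; omega)]
            simp
        · -- budget exhausted before the first period
          have hscan : pvScanB b (pre ++ '.' :: rest) 0 0 =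
              pvScanB b rest (pre.length + 1) 0 := by
            rw [pvScanB_append, pvScanB_nodot hnp, Nat.zero_add, hstep,
                if_neg (fun hh => hc hh.2)]
          rw [pvG, if_neg hc, List.take_zero, List.map_nil, List.flatten_nil]
          rw [hscan, pvScanB_shift rest b (pre.length + 1)]
          have hneg : b - ((pre.length + 1 : Nat) : Int) ≤ 0 := by push_cast; omega
          rw [pvScanB_nonpos hneg]
          simp
      · -- no period at all
        rw [pvSplit_nodot hdot []]
        simp only [List.nil_append]
        have hg : pvG b [cs] = 0 := by
          have : ¬ ((cs.length : Int) + 1 ≤ b) := by omega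
          simp [pvG, this]
        rw [hg, List.take_zero, List.map_nil, List.flatten_nil, pvScanB_nodot hdot]
        simp

-- ===== VERDICT (by name: the statement is the Claim_ definition above) =====
theorem truncate_prompt_spec : Claim_equal_truncate_prompt := by
  intro prompt max_length _
  unfold Spec_truncate_prompt truncate_prompt truncate_prompt_alt
  by_cases hg : (prompt.toList.length : Int) ≤ max_length
  · rw [if_pos hg, if_pos hg]
  · rw [if_neg hg, if_neg hg]
    have hb : max_length - 50 ≤ (prompt.toList.length : Int) := by omega
    have hloop := pvLoopA_eq max_length (pvSplit [] prompt.toList) []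
    simp only [List.nil_append, List.length_nil, Int.natCast_zero, sub_zero] at hloop
    have hbridge := pvBridge prompt.toList.length prompt.toList le_rfl (max_length - 50) hb
    simp only [splitOn_eq_pvSplit, hloop, hbridge, PySem.List.slice_to_natCast]
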